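-- pv_equiv track=rewrite | github.com/ursakumeljfaks/Prakticna-matematika | 1.letnik/programiranje1/vaje/9/cete.py | dolzina_najdaljse_narascajoce_cete
-- ===== SOURCE A (Python) =====
-- def dolzina_najdaljse_narascajoce_cete(tabela):
--     """ugotovi dolzino najdaljse cete v tabeli tabela"""
--     if tabela == []:
--         return 0
--     najdaljsa = 0
--     dolzina = 1
--     for i in range(1, len(tabela)):
--         if tabela[i-1] < tabela[i]:
--             dolzina += 1
--         else:
--             if dolzina > najdaljsa:
--                 najdaljsa = dolzina
--             dolzina = 1
--     return max(najdaljsa, dolzina)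
-- ===== SOURCE B (Python) =====
-- def dolzina_najdaljse_narascajoce_cete(tabela):
--     """ugotovi dolzino najdaljse cete v tabeli tabela"""
--     if tabela == []:
--         return 0
--     # phase 1: boundary indices where an increasing run ends/starts
--     mejniki = [0]
--     for i, (x, y) in enumerate(zip(tabela, tabela[1:]), 1):
--         if not x < y:
--             mejniki.append(i)
--     mejniki.append(len(tabela))
--     # phase 2: the answer is the widest gap between consecutive boundaries
--     return max(b - a for a, b in zip(mejniki, mejniki[1:]))
-- ===== Notes on version B (the rewrite author's own statement) =====
-- stated objective: alternative
-- what changed: Replaced A's single accumulate-and-reset loop (tracking current and best run length) by a two-phase computation: first collect the boundary indices where an increasing run ends, then return the widest gap between consecutive boundaries.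
import Mathlib
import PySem

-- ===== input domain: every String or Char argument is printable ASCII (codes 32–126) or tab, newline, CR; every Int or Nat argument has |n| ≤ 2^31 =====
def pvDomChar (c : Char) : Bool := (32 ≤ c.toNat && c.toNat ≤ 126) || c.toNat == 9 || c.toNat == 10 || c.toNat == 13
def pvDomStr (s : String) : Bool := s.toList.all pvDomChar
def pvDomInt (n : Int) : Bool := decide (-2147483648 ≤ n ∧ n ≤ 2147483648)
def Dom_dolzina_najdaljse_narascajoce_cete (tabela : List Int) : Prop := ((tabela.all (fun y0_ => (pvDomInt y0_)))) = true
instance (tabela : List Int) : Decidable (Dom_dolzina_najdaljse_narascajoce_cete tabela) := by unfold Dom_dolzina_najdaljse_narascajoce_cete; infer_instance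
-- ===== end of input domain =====

-- B replaces A's accumulate-and-reset loop by a two-phase computation (collect run-boundary
-- indices, then take the widest gap between consecutive boundaries); objective: alternative.


-- ===== PORT A =====
def dolzina_najdaljse_narascajoce_cete (tabela : List Int) : Int :=
  if tabela == [] then 0
  else
    let st := (PySem.List.pyRange 1 (tabela.length : Int) 1).foldl
      (fun (st : Int × Int) i =>
        if PySem.List.pyGetD tabela (i - 1) 0 < PySem.List.pyGetD tabela i 0 then
          (st.1, st.2 + 1)
        else
          ((if st.2 > st.1 then st.2 else st.1), 1))
      (0, 1)
    max st.1 st.2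

-- ===== PORT B =====
def dolzina_najdaljse_narascajoce_cete_alt (tabela : List Int) : Int :=
  if tabela == [] then 0
  else
    let pari := tabela.zip (PySem.List.slice tabela (some 1) none)
    let mejniki := (PySem.List.enumerate pari 1).foldl
      (fun (acc : List Int) ip => if ¬ (ip.2.1 < ip.2.2) then acc ++ [ip.1] else acc)
      [(0 : Int)]
    let mejniki := mejniki ++ [(tabela.length : Int)]
    let razlike := (mejniki.zip (PySem.List.slice mejniki (some 1) none)).map
      (fun p => p.2 - p.1)
    (PySem.List.max? razlike (fun x => x)).getD 0

-- ===== PRECONDITION & SPEC =====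
def Spec_dolzina_najdaljse_narascajoce_cete (tabela : List Int) (out : Int) : Prop := out = dolzina_najdaljse_narascajoce_cete_alt tabela
instance (tabela : List Int) (out : Int) : Decidable (Spec_dolzina_najdaljse_narascajoce_cete tabela out) := by unfold Spec_dolzina_najdaljse_narascajoce_cete; infer_instance

-- ===== CLAIM (what is proved, stated in full; the proofs are below) =====
def Claim_equal_dolzina_najdaljse_narascajoce_cete : Prop := ∀ (tabela : List Int), Dom_dolzina_najdaljse_narascajoce_cete tabela → Spec_dolzina_najdaljse_narascajoce_cete tabela (dolzina_najdaljse_narascajoce_cete tabela)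

-- ===== LEMMAS AND PROOFS =====

-- run-length decomposition of the pairwise-comparison list: (first run length, later run lengths)
def pvRuns : List (Int × Int) → Int × List Int
  | [] => (1, [])
  | p :: ps =>
    let rr := pvRuns ps
    if p.1 < p.2 then (rr.1 + 1, rr.2) else (1, rr.1 :: rr.2)

-- 1-based positions (offset s) of non-increasing adjacent pairs
def pvFpos : List (Int × Int) → Int → List Int
  | [], _ => []
  | p :: ps, s => if p.1 < p.2 then pvFpos ps (s + 1) else s :: pvFpos ps (s + 1)

def pvDiffs (l : List Int) : List Int := (l.zip l.tail).map (fun p => p.2 - p.1)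

theorem pvFpos_shift (ps : List (Int × Int)) (s c : Int) :
    pvFpos ps (s + c) = (pvFpos ps s).map (· + c) := by
  induction ps generalizing s with
  | nil => simp [pvFpos]
  | cons p tl ih =>
    simp only [pvFpos]
    have : s + c + 1 = (s + 1) + c := by ring
    rw [this, ih]
    split <;> simp

theorem pvDiffs_cons_cons (a b : Int) (l : List Int) :
    pvDiffs (a :: b :: l) = (b - a) :: pvDiffs (b :: l) := by
  simp [pvDiffs]

theorem pvDiffs_map_add (l : List Int) (c : Int) :
    pvDiffs (l.map (· + c)) = pvDiffs l := by
  induction l with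
  | nil => simp [pvDiffs]
  | cons a tl ih =>
    cases tl with
    | nil => simp [pvDiffs]
    | cons b tl' =>
      simp only [List.map_cons] at ih ⊢
      rw [pvDiffs_cons_cons, pvDiffs_cons_cons, ih]
      congr 1
      ring

theorem pvFoldl_building (ps : List (Int × Int)) (s : Int) (acc : List Int) :
    (PySem.List.enumerate ps s).foldl
      (fun (acc : List Int) ip => if ¬ (ip.2.1 < ip.2.2) then acc ++ [ip.1] else acc) acc
      = acc ++ pvFpos ps s := by
  induction ps generalizing s acc with
  | nil => simp [PySem.List.enumerate_nil, pvFpos]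
  | cons p tl ih =>
    rw [PySem.List.enumerate_cons]
    simp only [List.foldl_cons, ih]
    by_cases h : p.1 < p.2
    · simp [pvFpos, h]
    · simp [pvFpos, h]

-- B's gap list is exactly the run-length decomposition
theorem pvGaps_eq_runs (ps : List (Int × Int)) :
    pvDiffs ((0 : Int) :: (pvFpos ps 1 ++ [(ps.length : Int) + 1]))
      = (pvRuns ps).1 :: (pvRuns ps).2 := by
  induction ps with
  | nil => simp [pvFpos, pvDiffs, pvRuns]
  | cons p tl ih =>
    have hshift : pvFpos tl (1 + 1) = (pvFpos tl 1).map (· + 1) := pvFpos_shift tl 1 1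
    have hlen : ((p :: tl).length : Int) + 1 = ((tl.length : Int) + 1) + 1 := by
      push_cast [List.length_cons]; ring
    by_cases h : p.1 < p.2
    · -- first pair increasing: head run grows by one
      simp only [pvFpos]
      rw [if_pos h, hlen, hshift]
      rw [show ((pvFpos tl 1).map (· + 1)) ++ [((tl.length : Int) + 1) + 1]
          = (pvFpos tl 1 ++ [(tl.length : Int) + 1]).map (· + 1) from by simp]
      cases hfp : pvFpos tl 1 ++ [(tl.length : Int) + 1] with
      | nil => simp at hfp
      | cons x xs =>
        rw [List.map_cons, pvDiffs_cons_cons]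
        rw [show pvDiffs ((x + 1) :: xs.map (· + 1)) = pvDiffs (x :: xs) from by
          simpa using pvDiffs_map_add (x :: xs) 1]
        have hbase := ih
        rw [hfp, pvDiffs_cons_cons] at hbase
        simp only [pvRuns, if_pos h]
        injection hbase with h1 h2
        rw [h2, ← h1]
        congr 1
        ring
    · -- first pair non-increasing: a new run of length 1 starts
      simp only [pvFpos]
      rw [if_neg h, hlen, hshift, List.cons_append]
      rw [show ((pvFpos tl 1).map (· + 1)) ++ [((tl.length : Int) + 1) + 1]
          = (pvFpos tl 1 ++ [(tl.length : Int) + 1]).map (· + 1) from by simp]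
      rw [pvDiffs_cons_cons]
      rw [show pvDiffs ((1 : Int) :: (pvFpos tl 1 ++ [(tl.length : Int) + 1]).map (· + 1))
          = pvDiffs ((0 : Int) :: (pvFpos tl 1 ++ [(tl.length : Int) + 1])) from by
        simpa using pvDiffs_map_add ((0 : Int) :: (pvFpos tl 1 ++ [(tl.length : Int) + 1])) 1]
      rw [ih]
      simp [pvRuns, h]

theorem pvFoldl_max_max (l : List Int) (a b : Int) :
    l.foldl max (max a b) = max a (l.foldl max b) := by
  induction l generalizing b with
  | nil => simp
  | cons x xs ih =>
    simp only [List.foldl_cons]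
    rw [max_assoc, ih]

-- A's fold computes the max over the run lengths (generalized over the loop state)
theorem pvAfold_eq (ps : List (Int × Int)) (naj dol : Int) :
    max (ps.foldl
        (fun (st : Int × Int) p =>
          if p.1 < p.2 then (st.1, st.2 + 1)
          else ((if st.2 > st.1 then st.2 else st.1), 1)) (naj, dol)).1
      (ps.foldl
        (fun (st : Int × Int) p =>
          if p.1 < p.2 then (st.1, st.2 + 1)
          else ((if st.2 > st.1 then st.2 else st.1), 1)) (naj, dol)).2
    = max naj ((pvRuns ps).2.foldl max (dol + (pvRuns ps).1 - 1)) := by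
  induction ps generalizing naj dol with
  | nil =>
    simp only [List.foldl_nil, pvRuns]
    congr 1
    ring
  | cons p tl ih =>
    by_cases h : p.1 < p.2
    · simp only [List.foldl_cons, if_pos h, pvRuns]
      rw [ih]
      congr 2
      ring
    · simp only [List.foldl_cons, if_neg h, pvRuns]
      have hstep : (if dol > naj then dol else naj) = max naj dol := by
        by_cases h' : dol > naj
        · rw [if_pos h', max_def, if_pos (by omega)]
        · rw [if_neg h', max_def]
          split <;> omega
      rw [hstep, ih]
      rw [show (1 : Int) + (pvRuns tl).1 - 1 = (pvRuns tl).1 from by ring]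
      rw [show dol + 1 - 1 = dol from by ring, pvFoldl_max_max, ← max_assoc]

theorem pvRuns_head_pos (ps : List (Int × Int)) : 1 ≤ (pvRuns ps).1 := by
  induction ps with
  | nil => simp [pvRuns]
  | cons p tl ih =>
    simp only [pvRuns]
    split
    · simp
      omega
    · simp

theorem pvFoldl_max_le_init (l : List Int) (a : Int) : a ≤ l.foldl max a := by
  induction l generalizing a with
  | nil => simp
  | cons x xs ih => exact le_trans (le_max_left a x) (ih (max a x))

theorem pvFoldl_max_mem (l : List Int) (a : Int) : l.foldl max a = a ∨ l.foldl max a ∈ l := by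
  induction l generalizing a with
  | nil => simp
  | cons x xs ih =>
    simp only [List.foldl_cons]
    rcases ih (max a x) with h | h
    · rcases max_choice a x with h' | h' <;> rw [h, h']
      · left; rfl
      · right; simp
    · right; simp [h]

theorem pvFoldl_max_is_max (l : List Int) (a : Int) : ∀ y ∈ l, y ≤ l.foldl max a := by
  induction l generalizing a with
  | nil => simp
  | cons x xs ih =>
    intro y hy
    rcases List.mem_cons.mp hy with rfl | hy'
    · exact le_trans (le_max_right a y) (pvFoldl_max_le_init xs (max a y))
    · exact ih (max a x) y hy'

-- Python max of a nonempty Int list is the fold of Int.max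
theorem pvMax?_cons (r : Int) (rs : List Int) :
    (PySem.List.max? (r :: rs) (fun x => x)).getD 0 = rs.foldl max r := by
  cases hm : PySem.List.max? (r :: rs) (fun x => x) with
  | none => simp [PySem.List.max?_eq_none_iff] at hm
  | some m =>
    have hmem := PySem.List.max?_mem hm
    have hismax := PySem.List.max?_isMax hm
    have h1 : m ≤ rs.foldl max r := by
      rcases List.mem_cons.mp hmem with rfl | h
      · exact pvFoldl_max_le_init rs m
      · exact pvFoldl_max_is_max rs r m h
    have h2 : rs.foldl max r ≤ m := by
      rcases pvFoldl_max_mem rs r with h | h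
      · rw [h]; exact hismax r (by simp)
      · exact hismax _ (by simp [h])
    simp [le_antisymm h1 h2]

-- the pairwise-comparison list, read off A's index loop
theorem pvIndexPairs (tabela : List Int) (h : tabela ≠ []) :
    (PySem.List.pyRange 1 (tabela.length : Int) 1).map
        (fun i => (PySem.List.pyGetD tabela (i - 1) 0, PySem.List.pyGetD tabela i 0))
      = tabela.zip tabela.tail := by
  apply List.ext_getElem
  · cases tabela with
    | nil => simp at h
    | cons x xs => simp [PySem.List.length_pyRange_one]
  · intro k h1 h2
    have hk : k < tabela.length - 1 := by
      simpa [PySem.List.length_pyRange_one] using h1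
    simp only [List.getElem_map, PySem.List.getElem_pyRange_one, List.getElem_zip,
      List.getElem_tail]
    have e1 : (1 : Int) + (k : Int) - 1 = ((k : Nat) : Int) := by ring
    have e2 : (1 : Int) + (k : Int) = (((k + 1 : Nat)) : Int) := by push_cast; ring
    rw [e1, e2, PySem.List.pyGetD_natCast, PySem.List.pyGetD_natCast,
      List.getD_eq_getElem _ _ (by omega), List.getD_eq_getElem _ _ (by omega)]

-- ===== VERDICT (by name: the statement is the Claim_ definition above) =====
theorem dolzina_najdaljse_narascajoce_cete_spec : Claim_equal_dolzina_najdaljse_narascajoce_cete := by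
  intro tabela _
  unfold Spec_dolzina_najdaljse_narascajoce_cete
  unfold dolzina_najdaljse_narascajoce_cete dolzina_najdaljse_narascajoce_cete_alt
  by_cases h : tabela = []
  · simp [h]
  · simp only [h, beq_iff_eq, if_false, PySem.List.slice_from_one]
    set P := tabela.zip tabela.tail with hP
    -- A side
    rw [show ((PySem.List.pyRange 1 (tabela.length : Int) 1).foldl
          (fun (st : Int × Int) i =>
            if PySem.List.pyGetD tabela (i - 1) 0 < PySem.List.pyGetD tabela i 0 then
              (st.1, st.2 + 1)
            else ((if st.2 > st.1 then st.2 else st.1), 1)) (0, 1))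
        = P.foldl (fun (st : Int × Int) p =>
            if p.1 < p.2 then (st.1, st.2 + 1)
            else ((if st.2 > st.1 then st.2 else st.1), 1)) (0, 1) from by
      rw [hP, ← pvIndexPairs tabela h, List.foldl_map]]
    rw [pvAfold_eq P 0 1]
    -- B side
    have hlenP : ((P.length : Int) + 1) = (tabela.length : Int) := by
      cases tabela with
      | nil => simp at h
      | cons x xs => simp [hP]
    have hB : (((([ (0:Int) ] ++ pvFpos P 1) ++ [(tabela.length : Int)]).zip
          ((([ (0:Int) ] ++ pvFpos P 1) ++ [(tabela.length : Int)]).tail)).map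
            (fun p => p.2 - p.1))
        = (pvRuns P).1 :: (pvRuns P).2 := by
      have hg := pvGaps_eq_runs P
      rw [hlenP] at hg
      simpa [pvDiffs] using hg
    rw [pvFoldl_building P 1 [(0 : Int)], hB, pvMax?_cons]
    rw [show (1 : Int) + (pvRuns P).1 - 1 = (pvRuns P).1 from by ring]
    have hge : (1 : Int) ≤ (pvRuns P).2.foldl max (pvRuns P).1 :=
      le_trans (pvRuns_head_pos P) (pvFoldl_max_le_init _ _)
    rw [max_eq_right (by omega)]
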